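-- pv_equiv track=rewrite | github.com/kwonkh/download | 0708.py | my_min
-- ===== SOURCE A (Python) =====
-- def my_min(setnum, th=1):
--     l = list(set(setnum))
--     cn = 0
--     for i in l:
--         cn += 1
--     al = list(range(cn))
--     for i in (range(cn)):
--         al[i] = [l[i], 1]
--     for i in (range(cn)):
--         for j in (range(cn)):
--             if (al[i][0] > al[j][0]):
--                 al[i][1] += 1
--     for i in (range(cn)):
--         if (al[i][1] == th):
--             return al[i][0]
--             break
-- ===== SOURCE B (Python) =====
-- def my_min(setnum, th=1):
--     s = sorted(set(setnum))
--     if 1 <= th <= len(s):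
--         return s[th - 1]
--     return None
-- ===== Notes on version B (the rewrite author's own statement) =====
-- stated objective: faster
-- what changed: Replaces the quadratic pairwise rank table (count how many distinct elements each element exceeds, then scan for rank th) by sorting the distinct elements once and indexing the th-1 position, with an explicit range guard returning None.
import Mathlib
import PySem

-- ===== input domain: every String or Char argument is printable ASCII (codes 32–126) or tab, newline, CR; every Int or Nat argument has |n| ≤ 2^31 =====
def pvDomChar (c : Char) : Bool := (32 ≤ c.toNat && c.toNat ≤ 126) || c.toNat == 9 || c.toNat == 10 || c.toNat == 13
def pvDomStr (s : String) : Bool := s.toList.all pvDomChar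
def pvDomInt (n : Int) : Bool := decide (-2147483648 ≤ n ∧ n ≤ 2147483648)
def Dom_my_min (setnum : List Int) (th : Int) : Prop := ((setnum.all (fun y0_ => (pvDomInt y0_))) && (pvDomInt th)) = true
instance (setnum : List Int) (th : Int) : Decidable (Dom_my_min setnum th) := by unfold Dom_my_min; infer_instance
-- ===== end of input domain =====

-- B replaces A's quadratic pairwise rank table by sort-the-distinct-elements then index (measured faster at the largest timing size).

-- ===== PORT A =====
-- 'if al[i][0] > al[j][0]: al[i][1] += 1' — the body of A's nested loop
def pvA_step (a : List (Int × Int)) (i j : Int) : List (Int × Int) :=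
  if (PySem.List.pyGetD a i (0, 0)).1 > (PySem.List.pyGetD a j (0, 0)).1 then
    PySem.List.pySetD a i ((PySem.List.pyGetD a i (0, 0)).1, (PySem.List.pyGetD a i (0, 0)).2 + 1)
  else a

def my_min (setnum : List Int) (th : Int) : Option Int :=
  let l : List Int := PySem.Set.ofList setnum
  let cn : Int := l.foldl (fun c _ => c + 1) 0
  let al0 : List (Int × Int) :=
    (PySem.List.pyRange 0 cn 1).map (fun i => (PySem.List.pyGetD l i 0, (1 : Int)))
  let al :=
    (PySem.List.pyRange 0 cn 1).foldl (fun a i =>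
      (PySem.List.pyRange 0 cn 1).foldl (fun a j => pvA_step a i j) a) al0
  (PySem.List.pyRange 0 cn 1).findSome? (fun i =>
    if (PySem.List.pyGetD al i (0, 0)).2 == th then some (PySem.List.pyGetD al i (0, 0)).1
    else none)

-- ===== PORT B =====
def my_min_alt (setnum : List Int) (th : Int) : Option Int :=
  let s : List Int := PySem.List.sorted (PySem.Set.ofList setnum) (fun x => x) false
  if 1 ≤ th ∧ th ≤ (s.length : Int) then PySem.List.pyGet? s (th - 1) else none

-- ===== PRECONDITION & SPEC =====
def Spec_my_min (setnum : List Int) (th : Int) (out : Option Int) : Prop := out = my_min_alt setnum th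
instance (setnum : List Int) (th : Int) (out : Option Int) : Decidable (Spec_my_min setnum th out) := by unfold Spec_my_min; infer_instance

-- ===== CLAIM (what is proved, stated in full; the proofs are below) =====
def Claim_equal_my_min : Prop := ∀ (setnum : List Int) (th : Int), Dom_my_min setnum th → Spec_my_min setnum th (my_min setnum th)

-- ===== LEMMAS AND PROOFS =====

-- counting loop of A: 'cn = 0; for i in l: cn += 1'
lemma pv_foldl_count (l : List Int) (a : Int) : l.foldl (fun c _ => c + 1) a = a + l.length := by
  induction l generalizing a with
  | nil => simp
  | cons x t ih => simp [List.foldl_cons, ih]; omega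

-- on a strictly increasing list, the number of elements below s[k] is k
lemma pv_countP_lt_of_sorted (s : List Int) (hs : s.Pairwise (· < ·)) (k : Nat) (hk : k < s.length) :
    s.countP (fun y => decide (y < s[k])) = k := by
  induction s generalizing k with
  | nil => simp at hk
  | cons x t ih =>
    rcases List.pairwise_cons.mp hs with ⟨hx, ht⟩
    cases k with
    | zero =>
      simp only [List.getElem_cons_zero, List.countP_cons]
      rw [if_neg (by simp)]
      have h0 : t.countP (fun y => decide (y < x)) = 0 :=
        List.countP_eq_zero.mpr (fun y hy => by
          simp only [decide_eq_true_eq]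
          exact not_lt.mpr (le_of_lt (hx y hy)))
      exact Nat.add_zero _ ▸ h0
    | succ k =>
      simp only [List.getElem_cons_succ, List.countP_cons]
      have hk' : k < t.length := by simpa using hk
      rw [if_pos (by simp [hx t[k] (t.getElem_mem hk')])]
      exact congrArg (· + 1) (ih ht k hk')

-- on a strictly increasing list, getElem is injective
lemma pv_getElem_inj_of_sorted (s : List Int) (hs : s.Pairwise (· < ·)) (i j : Nat)
    (hi : i < s.length) (hj : j < s.length) (h : s[i] = s[j]) : i = j := by
  rcases lt_trichotomy i j with hij | hij | hij
  · exact absurd h (ne_of_lt ((List.pairwise_iff_getElem.mp hs) i j hi hj hij))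
  · exact hij
  · exact absurd h.symm (ne_of_lt ((List.pairwise_iff_getElem.mp hs) j i hj hi hij))

-- findSome? on a list where every hit yields the same value c and at least one hit exists
lemma pv_findSome_const {α β : Type} (l : List α) (f : α → Option β) (c : β)
    (hall : ∀ x ∈ l, f x = none ∨ f x = some c) (hex : ∃ x ∈ l, f x = some c) :
    l.findSome? f = some c := by
  induction l with
  | nil => simp at hex
  | cons x t ih =>
    rcases hall x (List.mem_cons_self) with h | h
    · simp only [List.findSome?_cons, h]
      rcases hex with ⟨y, hy, hfy⟩
      rcases List.mem_cons.mp hy with rfl | hyt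
      · rw [h] at hfy; exact absurd hfy (by simp)
      · exact ih (fun z hz => hall z (List.mem_cons_of_mem _ hz)) ⟨y, hyt, hfy⟩
    · simp [h]

-- the inner loop 'for j in range(cn): if al[i][0] > al[j][0]: al[i][1] += 1'
lemma pv_inner_fold (m : List Int) (i : Int) (hi0 : 0 ≤ i) (hin : i.toNat < m.length)
    (js : List Int) (hjs : ∀ j ∈ js, 0 ≤ j ∧ j.toNat < m.length)
    (a : List (Int × Int)) (hlen : a.length = m.length)
    (hfst : ∀ k (h : k < m.length), (a[k]'(by omega)).1 = m[k]) :
    js.foldl (fun a j => pvA_step a i j) a =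
      a.set i.toNat (m[i.toNat],
        (a[i.toNat]'(by omega)).2 +
          (js.countP (fun j => decide (PySem.List.pyGetD m j 0 < m[i.toNat])) : Int)) := by
  induction js generalizing a with
  | nil =>
    simp only [List.foldl_nil, List.countP_nil, Int.natCast_zero, add_zero]
    have h1 : (a[i.toNat]'(by omega)).1 = m[i.toNat] := hfst i.toNat hin
    calc a = a.set i.toNat (a[i.toNat]'(by omega)) := (List.set_getElem_self (by omega)).symm
      _ = _ := by rw [← h1]
  | cons j js ih =>
    have hj := hjs j List.mem_cons_self
    have hga : PySem.List.pyGetD a i (0, 0) = a[i.toNat]'(by omega) :=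
      PySem.List.pyGetD_eq_getElem a (0, 0) hi0 (by omega)
    have hgaj : PySem.List.pyGetD a j (0, 0) = a[j.toNat]'(by omega) :=
      PySem.List.pyGetD_eq_getElem a (0, 0) hj.1 (by omega)
    have hgm : PySem.List.pyGetD m j 0 = m[j.toNat]'hj.2 :=
      PySem.List.pyGetD_eq_getElem m 0 hj.1 (by omega)
    have hjs' : ∀ x ∈ js, 0 ≤ x ∧ x.toNat < m.length := fun x hx => hjs x (List.mem_cons_of_mem _ hx)
    rw [List.foldl_cons]
    have hstep : pvA_step a i j =
        if m[j.toNat]'hj.2 < m[i.toNat]'hin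
        then a.set i.toNat (m[i.toNat]'hin, (a[i.toNat]'(by omega)).2 + 1) else a := by
      simp only [pvA_step, hga, hgaj, hfst i.toNat hin, hfst j.toNat hj.2,
        PySem.List.pySetD_of_nonneg a _ hi0]
    rw [hstep]
    by_cases hcmp : m[j.toNat]'hj.2 < m[i.toNat]'hin
    · rw [if_pos hcmp]
      have hlen' : (a.set i.toNat (m[i.toNat]'hin, (a[i.toNat]'(by omega)).2 + 1)).length = m.length := by
        simp [hlen]
      have hfst' : ∀ k (h : k < m.length),
          ((a.set i.toNat (m[i.toNat]'hin, (a[i.toNat]'(by omega)).2 + 1))[k]'(by omega)).1 = m[k] := by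
        intro k hk
        rw [List.getElem_set]
        by_cases hik : i.toNat = k
        · subst hik; simp
        · rw [if_neg hik]; exact hfst k hk
      rw [ih hjs' _ hlen' hfst']
      rw [List.set_set]
      have h2 : ((a.set i.toNat (m[i.toNat]'hin, (a[i.toNat]'(by omega)).2 + 1))[i.toNat]'(by omega)).2
          = (a[i.toNat]'(by omega)).2 + 1 := by
        rw [List.getElem_set_self]
      rw [h2, List.countP_cons, if_pos (by rw [hgm]; simpa using hcmp)]
      push_cast
      ring_nf
    · rw [if_neg (by simpa using hcmp)]
      rw [ih hjs' _ hlen hfst]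
      rw [List.countP_cons, if_neg (by rw [hgm]; simpa using hcmp), Nat.add_zero]

-- the outer loop: entry k ends as (m[k], start.2 + (count of k among the indices) * (#smaller))
lemma pv_outer_fold (m : List Int)
    (js : List Int) (hjs : ∀ j ∈ js, 0 ≤ j ∧ j.toNat < m.length)
    (a : List (Int × Int)) (hlen : a.length = m.length)
    (hfst : ∀ k (h : k < m.length), (a[k]'(by omega)).1 = m[k]) :
    (js.foldl (fun a i =>
        (PySem.List.pyRange 0 (m.length : Int) 1).foldl (fun a j => pvA_step a i j) a) a).length
        = m.length ∧
    ∀ k (h : k < m.length),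
      (js.foldl (fun a i =>
        (PySem.List.pyRange 0 (m.length : Int) 1).foldl (fun a j => pvA_step a i j) a) a)[k]? =
      some (m[k], (a[k]'(by omega)).2 +
        (js.count (k : Int) : Int) * (m.countP (fun y => decide (y < m[k])) : Int)) := by
  induction js generalizing a with
  | nil =>
    refine ⟨hlen, fun k h => ?_⟩
    simp only [List.foldl_nil]
    rw [List.getElem?_eq_getElem (by omega)]
    simp only [List.count_nil, Int.natCast_zero, zero_mul, add_zero, Option.some.injEq]
    exact Prod.ext (hfst k h) rfl
  | cons i js ih =>
    have hi := hjs i List.mem_cons_self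
    have hjs' : ∀ x ∈ js, 0 ≤ x ∧ x.toNat < m.length := fun x hx => hjs x (List.mem_cons_of_mem _ hx)
    rw [List.foldl_cons]
    rw [pv_inner_fold m i hi.1 hi.2 _
      (fun j hj => by
        rcases PySem.List.mem_pyRange_one.mp hj with ⟨h1, h2⟩
        exact ⟨h1, by omega⟩) a hlen hfst]
    have hC : ∀ x : Int, (PySem.List.pyRange 0 (m.length : Int) 1).countP
        (fun j => decide (PySem.List.pyGetD m j 0 < x)) =
        m.countP (fun y => decide (y < x)) := by
      intro x
      conv_rhs => rw [← PySem.List.map_pyGetD_pyRange_zero' m 0]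
      rw [List.countP_map]
      rfl
    set a' := a.set i.toNat (m[i.toNat]'hi.2,
      (a[i.toNat]'(by omega)).2 +
        ((PySem.List.pyRange 0 (m.length : Int) 1).countP
          (fun j => decide (PySem.List.pyGetD m j 0 < m[i.toNat]'hi.2)) : Int)) with ha'
    have hlen' : a'.length = m.length := by rw [ha']; simp [hlen]
    have hfst' : ∀ k (h : k < m.length), (a'[k]'(by omega)).1 = m[k] := by
      intro k hk
      simp only [ha', List.getElem_set]
      by_cases hik : i.toNat = k
      · subst hik; simp
      · rw [if_neg hik]; exact hfst k hk
    rcases ih hjs' a' hlen' hfst' with ⟨hl2, hg2⟩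
    refine ⟨hl2, fun k hk => ?_⟩
    rw [hg2 k hk, List.count_cons]
    have ha'k : (a'[k]'(by omega)).2 =
        if i.toNat = k then (a[k]'(by omega)).2 + (m.countP (fun y => decide (y < m[k])) : Int)
        else (a[k]'(by omega)).2 := by
      simp only [ha', List.getElem_set]
      by_cases hik : i.toNat = k
      · subst hik
        rw [if_pos rfl, if_pos rfl]
        simp [hC m[i.toNat]]
      · rw [if_neg hik, if_neg hik]
    by_cases hik : i.toNat = k
    · subst hik
      rw [ha'k, if_pos rfl, if_pos (by simp; omega)]
      congr 2
      push_cast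
      ring
    · rw [ha'k, if_neg hik, if_neg (by simp; omega), Nat.add_zero]

-- rank of the entry at index i of m (1 + number of strictly smaller entries), as A computes it
def pvRank (m : List Int) (i : Int) : Int :=
  1 + (m.countP (fun y => decide (y < m.getD i.toNat 0)) : Int)

-- what A's final scan tests at index i, expressed through the rank
def pvF (m : List Int) (th : Int) (i : Int) : Option Int :=
  if pvRank m i == th then some (m.getD i.toNat 0) else none

lemma pv_findSome_congr {α β : Type} (l : List α) (f g : α → Option β)
    (h : ∀ x ∈ l, f x = g x) : l.findSome? f = l.findSome? g := by
  induction l with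
  | nil => rfl
  | cons x t ih =>
    rcases hgx : g x with _ | v
    · simp [h x List.mem_cons_self, hgx,
        ih (fun y hy => h y (List.mem_cons_of_mem _ hy))]
    · simp [h x List.mem_cons_self, hgx]

-- A's scan over the rank table returns exactly the (th-1)-indexed element of the sorted distinct list
lemma pv_select (setnum : List Int) (th : Int) :
    (PySem.List.pyRange 0 ((PySem.Set.ofList setnum).length : Int) 1).findSome?
      (pvF (PySem.Set.ofList setnum) th) =
    if 1 ≤ th ∧ th ≤ ((PySem.List.sorted (PySem.Set.ofList setnum) (fun x => x) false).length : Int)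
    then PySem.List.pyGet? (PySem.List.sorted (PySem.Set.ofList setnum) (fun x => x) false) (th - 1)
    else none := by
  have hpair := PySem.List.sorted_ofList_pairwise_lt (κ := Int) setnum
  have hperm := PySem.List.sorted_perm (PySem.Set.ofList setnum) (fun x : Int => x) false
  have hslen := PySem.List.length_sorted (PySem.Set.ofList setnum) (fun x : Int => x) false
  generalize hsm : PySem.Set.ofList setnum = m at *
  generalize hss : PySem.List.sorted m (fun x : Int => x) false = s at *
  have hrank : ∀ (it : Nat) (h : it < m.length),
      ∃ (ks : Nat) (hks : ks < s.length), s[ks] = m[it] ∧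
        m.countP (fun y => decide (y < m[it])) = ks := by
    intro it h
    have hmem : m[it] ∈ s := hperm.mem_iff.mpr (List.getElem_mem h)
    obtain ⟨ks, hks, hkse⟩ := List.getElem_of_mem hmem
    refine ⟨ks, hks, hkse, ?_⟩
    rw [← hkse, ← hperm.countP_eq]
    exact pv_countP_lt_of_sorted s hpair ks hks
  by_cases hth : 1 ≤ th ∧ th ≤ (m.length : Int)
  · have hthr : 1 ≤ th ∧ th ≤ (s.length : Int) := ⟨hth.1, by omega⟩
    rw [if_pos hthr]
    have ht : (th - 1).toNat < s.length := by omega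
    rw [PySem.List.pyGet?_eq_some_getElem s (by omega) (by omega)]
    apply pv_findSome_const
    · intro i hi
      rcases PySem.List.mem_pyRange_one.mp hi with ⟨h0, h1⟩
      have hit : i.toNat < m.length := by omega
      obtain ⟨ks, hks, hkse, hkc⟩ := hrank i.toNat hit
      unfold pvF pvRank
      rw [List.getD_eq_getElem m 0 hit, hkc]
      by_cases he : (1 : Int) + (ks : Int) = th
      · right
        rw [if_pos (by simpa using he)]
        have hkt : ks = (th - 1).toNat := by omega
        subst hkt
        rw [← hkse]
      · left
        rw [if_neg (by simpa using he)]
    · have hmem : s[(th - 1).toNat] ∈ m := hperm.mem_iff.mp (List.getElem_mem ht)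
      obtain ⟨i0, hi0, hi0e⟩ := List.getElem_of_mem hmem
      refine ⟨(i0 : Int), PySem.List.mem_pyRange_one.mpr
        ⟨Int.natCast_nonneg i0, by omega⟩, ?_⟩
      obtain ⟨ks, hks, hkse, hkc⟩ := hrank i0 hi0
      have hkt : ks = (th - 1).toNat :=
        pv_getElem_inj_of_sorted s hpair ks _ hks ht (hkse.trans hi0e)
      simp only [pvF, pvRank, Int.toNat_natCast, List.getD_eq_getElem m 0 hi0]
      rw [hkc, if_pos (by simp only [beq_iff_eq]; omega), hi0e]
  · rw [if_neg (by omega)]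
    apply List.findSome?_eq_none_iff.mpr
    intro i hi
    rcases PySem.List.mem_pyRange_one.mp hi with ⟨h0, h1⟩
    have hit : i.toNat < m.length := by omega
    obtain ⟨ks, hks, _, hkc⟩ := hrank i.toNat hit
    unfold pvF pvRank
    rw [List.getD_eq_getElem m 0 hit, hkc,
      if_neg (by simp only [beq_iff_eq]; omega)]

theorem pv_eq (setnum : List Int) (th : Int) : my_min setnum th = my_min_alt setnum th := by
  unfold my_min my_min_alt
  simp only [pv_foldl_count, zero_add]
  have hjs : ∀ j ∈ PySem.List.pyRange 0 ((PySem.Set.ofList setnum).length : Int) 1,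
      0 ≤ j ∧ j.toNat < (PySem.Set.ofList setnum).length := by
    intro j hj
    rcases PySem.List.mem_pyRange_one.mp hj with ⟨h1, h2⟩
    exact ⟨h1, by omega⟩
  have hlen0 : ((PySem.List.pyRange 0 ((PySem.Set.ofList setnum).length : Int) 1).map
      (fun i => (PySem.List.pyGetD (PySem.Set.ofList setnum) i 0, (1 : Int)))).length
      = (PySem.Set.ofList setnum).length := by
    rw [List.length_map, PySem.List.length_pyRange_one]; omega
  have hfst0 : ∀ k (h : k < (PySem.Set.ofList setnum).length),
      (((PySem.List.pyRange 0 ((PySem.Set.ofList setnum).length : Int) 1).map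
        (fun i => (PySem.List.pyGetD (PySem.Set.ofList setnum) i 0, (1 : Int))))[k]'(by omega)).1
      = (PySem.Set.ofList setnum)[k] := by
    intro k hk
    rw [List.getElem_map, PySem.List.getElem_pyRange_one]
    simp only [zero_add, PySem.List.pyGetD_natCast]
    exact List.getD_eq_getElem _ _ hk
  obtain ⟨hL, hG⟩ := pv_outer_fold (PySem.Set.ofList setnum) _ hjs _ hlen0 hfst0
  rw [pv_findSome_congr _ _ (pvF (PySem.Set.ofList setnum) th) ?_]
  · exact pv_select setnum th
  · intro i hi
    rcases PySem.List.mem_pyRange_one.mp hi with ⟨h0, h1⟩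
    have hit : i.toNat < (PySem.Set.ofList setnum).length := by omega
    have hcast : ((i.toNat : Int)) = i := Int.toNat_of_nonneg h0
    have hcount : List.count i (PySem.List.pyRange 0 ((PySem.Set.ofList setnum).length : Int) 1) = 1 :=
      List.count_eq_one_of_mem (PySem.List.nodup_pyRange_one _ _) hi
    have hALg := hG i.toNat hit
    rw [hcast, hcount] at hALg
    have hsnd0 : (((PySem.List.pyRange 0 ((PySem.Set.ofList setnum).length : Int) 1).map
        (fun i => (PySem.List.pyGetD (PySem.Set.ofList setnum) i 0, (1 : Int))))[i.toNat]'(by omega)).2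
        = 1 := by
      rw [List.getElem_map]
    rw [hsnd0] at hALg
    rw [PySem.List.pyGetD_eq_getElem _ ((0 : Int), (0 : Int)) h0 (by omega),
      (List.getElem_eq_iff (by omega)).mpr hALg]
    simp only [pvF, pvRank, Nat.cast_one, one_mul, List.getD_eq_getElem _ _ hit]

-- ===== VERDICT (by name: the statement is the Claim_ definition above) =====
theorem my_min_spec : Claim_equal_my_min := by
  intro setnum th _
  unfold Spec_my_min
  exact pv_eq setnum th
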